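-- pv_equiv track=rewrite | github.com/ShahJahanIshaq/aoc-2024 | day-04/py/part1.py | getHorizontalCount
-- ===== SOURCE A (Python) =====
-- def getHorizontalCount(grid, searchString) -> int:
--     searchString = list(searchString)
--     count = 0
--     for row in grid:
--         for c in range(len(row) - len(searchString) + 1):
--             if row[c : c + len(searchString)] == searchString or row[c : c + len(searchString)] == searchString[::-1]:
--                 count += 1
--     return count
-- ===== SOURCE B (Python) =====
-- def _startswith(t, pat):
--     if len(t) < len(pat):
--         return False
--     for x, y in zip(t, pat):
--         if x != y:
--             return False
--     return True
--
--
-- def getHorizontalCount(grid, searchString) -> int: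
--     pat = list(searchString)
--     rev = pat[::-1]
--     both = pat != rev  # palindromic pattern: skip the reverse check entirely
--     count = 0
--     for row in grid:
--         t = row
--         while True:
--             if _startswith(t, pat) or (both and _startswith(t, rev)):
--                 count += 1
--             if not t:
--                 break
--             t = t[1:]
--     return count
-- ===== Notes on version B (the rewrite author's own statement) =====
-- stated objective: alternative
-- what changed: Replaces the index loop that builds and compares two fresh list slices at every position by a single walk over the row's suffixes with an early-exit element-by-element prefix test, and skips the reverse test entirely when the pattern is a palindrome.
import Mathlib
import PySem

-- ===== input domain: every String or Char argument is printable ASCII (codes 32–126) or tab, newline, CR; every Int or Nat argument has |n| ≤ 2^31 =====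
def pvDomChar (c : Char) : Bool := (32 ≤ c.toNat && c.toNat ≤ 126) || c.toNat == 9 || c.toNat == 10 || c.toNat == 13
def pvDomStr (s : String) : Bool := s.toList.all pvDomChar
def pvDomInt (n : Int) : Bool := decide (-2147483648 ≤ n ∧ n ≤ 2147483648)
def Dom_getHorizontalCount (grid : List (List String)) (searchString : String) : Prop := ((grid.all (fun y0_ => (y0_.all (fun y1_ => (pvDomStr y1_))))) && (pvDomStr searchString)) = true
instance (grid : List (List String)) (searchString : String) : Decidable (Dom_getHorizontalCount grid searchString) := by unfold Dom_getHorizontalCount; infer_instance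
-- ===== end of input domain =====

-- B walks each row's suffixes once with an early-exit prefix test (skipping the
-- reverse test for palindromic patterns) instead of A's index loop that builds
-- and compares two fresh slices at every position; alternative structure (not faster).


-- ===== PORT A =====
-- searchString = list(searchString): list of its one-character strings;
-- searchString[::-1] is List.reverse (PySem.List.slice?_none_none_neg_one).
def getHorizontalCount (grid : List (List String)) (searchString : String) : Int :=
  let searchList : List String := searchString.toList.map (fun ch => String.ofList [ch])
  grid.foldl (fun count row =>
    (PySem.List.pyRange 0 ((row.length : Int) - (searchList.length : Int) + 1) 1).foldl
      (fun count c =>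
        if PySem.List.slice row (some c) (some (c + (searchList.length : Int))) = searchList ∨
           PySem.List.slice row (some c) (some (c + (searchList.length : Int))) = searchList.reverse
        then count + 1 else count) count) 0

-- ===== PORT B =====
-- _startswith(t, pat): length guard, then early-exit pairwise comparison.
def pvStartswith (t pat : List String) : Bool :=
  if t.length < pat.length then false
  else (t.zip pat).all (fun p => p.1 == p.2)

-- the inner 'while True' loop over the suffixes of a row
def pvTailCount (pat rev : List String) (both : Bool) : List String → Int
  | [] => if pvStartswith [] pat || (both && pvStartswith [] rev) then 1 else 0
  | x :: tl =>
      (if pvStartswith (x :: tl) pat || (both && pvStartswith (x :: tl) rev) then 1 else 0)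
      + pvTailCount pat rev both tl

def getHorizontalCount_alt (grid : List (List String)) (searchString : String) : Int :=
  let pat : List String := searchString.toList.map (fun ch => String.ofList [ch])
  let rev : List String := pat.reverse
  let both : Bool := pat != rev
  grid.foldl (fun count row => count + pvTailCount pat rev both row) 0

-- ===== PRECONDITION & SPEC =====
def Spec_getHorizontalCount (grid : List (List String)) (searchString : String) (out : Int) : Prop := out = getHorizontalCount_alt grid searchString
instance (grid : List (List String)) (searchString : String) (out : Int) : Decidable (Spec_getHorizontalCount grid searchString out) := by unfold Spec_getHorizontalCount; infer_instance

-- ===== CLAIM (what is proved, stated in full; the proofs are below) =====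
def Claim_equal_getHorizontalCount : Prop := ∀ (grid : List (List String)) (searchString : String), Dom_getHorizontalCount grid searchString → Spec_getHorizontalCount grid searchString (getHorizontalCount grid searchString)

-- ===== LEMMAS AND PROOFS =====

-- prefix characterisation of B's early-exit comparison
theorem pvStartswith_iff (pat : List String) : ∀ (t : List String),
    (t.take pat.length = pat ↔ pvStartswith t pat = true) := by
  induction pat with
  | nil => intro t; simp [pvStartswith]
  | cons p ps ih =>
    intro t
    cases t with
    | nil => simp [pvStartswith]
    | cons x xs =>
      by_cases hl : xs.length < ps.length
      · rw [pvStartswith, if_pos (by simp; omega)]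
        simp only [List.length_cons, List.take_succ_cons, List.cons.injEq]
        constructor
        · rintro ⟨_, htk⟩
          have := congrArg List.length htk
          simp only [List.length_take] at this
          omega
        · simp
      · have h2 : List.take ps.length xs = ps ↔ ((xs.zip ps).all fun q => q.1 == q.2) = true := by
          rw [ih xs, pvStartswith, if_neg hl]
        rw [pvStartswith, if_neg (by simp; omega)]
        simp only [List.length_cons, List.take_succ_cons, List.cons.injEq,
          List.zip_cons_cons, List.all_cons, Bool.and_eq_true, beq_iff_eq, h2]

theorem pvStartswith_false_of_short (t pat : List String) (h : t.length < pat.length) :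
    pvStartswith t pat = false := by
  simp [pvStartswith, h]

-- the per-position condition of A equals the per-suffix condition of B
theorem cond_iff (pat t : List String) :
    (t.take pat.length = pat ∨ t.take pat.length = pat.reverse)
      ↔ (pvStartswith t pat || ((pat != pat.reverse) && pvStartswith t pat.reverse)) = true := by
  have h1 := pvStartswith_iff pat t
  have h2 := pvStartswith_iff pat.reverse t
  rw [List.length_reverse] at h2
  by_cases hpal : pat = pat.reverse
  · have hb : (pat != pat.reverse) = false := bne_eq_false_iff_eq.mpr hpal
    rw [hb]
    simp only [Bool.false_and, Bool.or_false]
    rw [← hpal, or_self]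
    exact h1
  · have hb : (pat != pat.reverse) = true := bne_iff_ne.mpr hpal
    rw [hb]
    simp only [Bool.true_and, Bool.or_eq_true]
    tauto

-- trim a countP over an index range past the point where the predicate is false
theorem countP_range_shrink (N N' : ℕ) (p : ℕ → Bool) (hle : N' ≤ N)
    (h : ∀ k, N' ≤ k → p k = false) :
    (List.range N).countP p = (List.range N').countP p := by
  have hN : N = N' + (N - N') := by omega
  rw [hN, List.range_add, List.countP_append]
  have : ((List.range (N - N')).map (N' + ·)).countP p = 0 := by
    rw [List.countP_eq_zero]
    intro a ha
    simp only [List.mem_map, List.mem_range] at ha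
    obtain ⟨k, _, rfl⟩ := ha
    simp [h (N' + k) (by omega)]
  omega

-- B's suffix walk counts the matching suffixes among all |row|+1 of them
theorem pvTailCount_eq_countP (pat rev : List String) (both : Bool) : ∀ (row : List String),
    pvTailCount pat rev both row =
      ((List.range (row.length + 1)).countP
        (fun k => pvStartswith (row.drop k) pat || (both && pvStartswith (row.drop k) rev)) : ℤ) := by
  intro row
  induction row with
  | nil => simp [pvTailCount]
  | cons x xs ih =>
    rw [pvTailCount, ih]
    have hlen : (x :: xs).length + 1 = (xs.length + 1) + 1 := by simp
    rw [hlen]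
    conv_rhs => rw [List.range_succ_eq_map]
    rw [List.countP_cons, List.countP_map]
    simp only [List.drop_zero, Function.comp_def, Nat.succ_eq_add_one, List.drop_succ_cons]
    push_cast
    ring

-- the per-row equality: A's index loop = B's suffix walk
theorem row_eq (pat : List String) (row : List String) (init : Int) :
    (PySem.List.pyRange 0 ((row.length : Int) - (pat.length : Int) + 1) 1).foldl
      (fun count c =>
        if PySem.List.slice row (some c) (some (c + (pat.length : Int))) = pat ∨
           PySem.List.slice row (some c) (some (c + (pat.length : Int))) = pat.reverse
        then count + 1 else count) init
    = init + pvTailCount pat pat.reverse (pat != pat.reverse) row := by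
  rw [PySem.List.foldl_ite_add_one, pvTailCount_eq_countP]
  congr 1
  rw [PySem.List.pyRange_one, List.countP_map]
  simp only [Function.comp_def, zero_add]
  have hK : (((row.length : Int) - (pat.length : Int) + 1) - 0).toNat
      = row.length + 1 - pat.length := by omega
  rw [hK]
  have hpred : ∀ k : ℕ,
      (decide (PySem.List.slice row (some (k : Int)) (some ((k : Int) + (pat.length : Int))) = pat ∨
        PySem.List.slice row (some (k : Int)) (some ((k : Int) + (pat.length : Int))) = pat.reverse))
      = (pvStartswith (row.drop k) pat || ((pat != pat.reverse) && pvStartswith (row.drop k) pat.reverse)) := by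
    intro k
    have hs : PySem.List.slice row (some (k : Int)) (some ((k : Int) + (pat.length : Int)))
        = (row.drop k).take pat.length :=
      PySem.List.slice_natCast_add (xs := row) (j := k) (n := pat.length)
    rw [hs, Bool.eq_iff_iff]
    simp only [decide_eq_true_eq]
    exact cond_iff pat (row.drop k)
  simp only [hpred]
  rw [Nat.cast_inj]
  by_cases hm0 : pat.length = 0
  · rw [hm0]; simp
  · symm
    apply countP_range_shrink (row.length + 1) (row.length + 1 - pat.length) _ (by omega)
    intro k hk
    have hlen : (row.drop k).length < pat.length := by
      simp only [List.length_drop]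
      omega
    rw [pvStartswith_false_of_short _ _ hlen,
        pvStartswith_false_of_short _ _ (by rw [List.length_reverse]; exact hlen)]
    simp

-- ===== VERDICT (by name: the statement is the Claim_ definition above) =====
theorem getHorizontalCount_spec : Claim_equal_getHorizontalCount := by
  intro grid searchString _
  simp only [Spec_getHorizontalCount, getHorizontalCount, getHorizontalCount_alt]
  congr 1
  funext count row
  exact row_eq _ row count
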